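-- pv_equiv track=rewrite | github.com/hawkjo/freebarcodes | freebarcodes/FreeDivSphere.py | _insertion_seqs
-- ===== SOURCE A (Python) =====
-- import itertools
--
-- bases = 'ACGT'
--
-- def _insertion_seqs(seq, idxtup):
--     """Iterates all sequences with insertions at given idxs from given seq."""
--     if not idxtup:
--         yield seq
--     else:
--         for ins_bases in itertools.product(bases, repeat=len(idxtup)):
--             newseq = seq[:idxtup[0]]
--             for base_idx, (i, j) in enumerate(zip(idxtup, idxtup[1:])):
--                 newseq += ins_bases[base_idx] + seq[i:j]
--             newseq += ins_bases[-1] + seq[idxtup[-1]:]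
--             yield newseq
-- ===== SOURCE B (Python) =====
-- bases = 'ACGT'
--
-- def _insertion_seqs(seq, idxtup):
--     """Worklist version: grow partial sequences position by position instead of
--     enumerating the full Cartesian product of inserted bases up front."""
--     if not idxtup:
--         yield seq
--         return
--     partials = [seq[:idxtup[0]]]
--     for i, j in zip(idxtup, idxtup[1:]):
--         partials = [p + b + seq[i:j] for p in partials for b in bases]
--     for p in partials:
--         for b in bases:
--             yield p + b + seq[idxtup[-1]:]
-- ===== Notes on version B (the rewrite author's own statement) =====
-- stated objective: alternative
-- what changed: B builds the output incrementally with a worklist of partial sequences extended segment by segment (sharing common prefixes), instead of enumerating the full Cartesian product of inserted bases and rebuilding each sequence from scratch.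
import Mathlib
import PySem

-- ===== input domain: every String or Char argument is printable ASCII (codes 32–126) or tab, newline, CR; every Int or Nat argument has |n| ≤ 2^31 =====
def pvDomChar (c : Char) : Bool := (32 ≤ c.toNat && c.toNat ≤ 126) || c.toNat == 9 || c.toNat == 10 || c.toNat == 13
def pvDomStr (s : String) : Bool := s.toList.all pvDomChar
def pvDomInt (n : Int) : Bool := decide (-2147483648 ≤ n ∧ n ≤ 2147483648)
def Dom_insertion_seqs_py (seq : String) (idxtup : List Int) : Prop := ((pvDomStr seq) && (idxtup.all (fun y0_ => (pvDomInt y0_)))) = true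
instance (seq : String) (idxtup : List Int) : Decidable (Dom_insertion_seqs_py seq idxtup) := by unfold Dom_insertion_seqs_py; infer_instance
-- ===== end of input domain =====

-- B changes only the construction strategy (worklist of partials instead of Cartesian-product tuples); return value proved identical.

-- ===== PORT A =====
-- bases = 'ACGT'
def pvBases : List Char := ['A', 'C', 'G', 'T']

-- itertools.product(bases, repeat=n), first component varying slowest
def pvProd : Nat → List (List Char)
  | 0 => [[]]
  | n + 1 => pvBases.flatMap (fun b => (pvProd n).map (b :: ·))

def insertion_seqs_py (seq : String) (idxtup : List Int) : List String :=
  match idxtup with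
  | [] => [seq]
  | i0 :: rest =>
    let s := seq.toList
    (pvProd idxtup.length).map (fun insb =>
      -- newseq = seq[:idxtup[0]]
      let new0 := PySem.List.slice s none (some i0)
      -- for base_idx, (i, j) in enumerate(zip(idxtup, idxtup[1:])): newseq += ins_bases[base_idx] + seq[i:j]
      -- (enumerate ported as an explicit counter in the fold state; ins_bases[base_idx] always in range)
      let st := (idxtup.zip rest).foldl
        (fun (st : Nat × List Char) (ij : Int × Int) =>
          (st.1 + 1, st.2 ++ [PySem.List.pyGetD insb (st.1 : Int) ' '] ++ PySem.List.slice s (some ij.1) (some ij.2)))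
        (0, new0)
      -- newseq += ins_bases[-1] + seq[idxtup[-1]:]
      String.ofList (st.2 ++ [PySem.List.pyGetD insb (-1) ' '] ++ PySem.List.slice s (some (PySem.List.pyGetD idxtup (-1) 0)) none))

-- ===== PORT B =====
def insertion_seqs_py_alt (seq : String) (idxtup : List Int) : List String :=
  match idxtup with
  | [] => [seq]
  | i0 :: rest =>
    let s := seq.toList
    -- partials = [seq[:idxtup[0]]]; for i, j in zip(idxtup, idxtup[1:]): partials = [p + b + seq[i:j] …]
    let partials := (idxtup.zip rest).foldl
      (fun (ps : List (List Char)) (ij : Int × Int) =>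
        ps.flatMap (fun p => pvBases.map (fun b => p ++ b :: PySem.List.slice s (some ij.1) (some ij.2))))
      [PySem.List.slice s none (some i0)]
    -- yield p + b + seq[idxtup[-1]:]
    partials.flatMap (fun p => pvBases.map (fun b =>
      String.ofList (p ++ b :: PySem.List.slice s (some (PySem.List.pyGetD idxtup (-1) 0)) none)))

-- ===== PRECONDITION & SPEC =====
def Spec_insertion_seqs_py (seq : String) (idxtup : List Int) (out : List String) : Prop := out = insertion_seqs_py_alt seq idxtup
instance (seq : String) (idxtup : List Int) (out : List String) : Decidable (Spec_insertion_seqs_py seq idxtup out) := by unfold Spec_insertion_seqs_py; infer_instance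

-- ===== CLAIM (what is proved, stated in full; the proofs are below) =====
def Claim_equal_insertion_seqs_py : Prop := ∀ (seq : String) (idxtup : List Int), Dom_insertion_seqs_py seq idxtup → Spec_insertion_seqs_py seq idxtup (insertion_seqs_py seq idxtup)

-- ===== LEMMAS AND PROOFS =====

theorem length_mem_pvProd {n : Nat} {insb : List Char} (h : insb ∈ pvProd n) : insb.length = n := by
  induction n generalizing insb with
  | zero => simp [pvProd] at h; simp [h]
  | succ n ih =>
    simp [pvProd] at h
    obtain ⟨b, _, t, ht, rfl⟩ := h
    simp [ih ht]

-- B's worklist fold, characterized via the product list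
theorem b_fold (segs : List (List Char)) :
    ∀ ps : List (List Char),
      segs.foldl (fun ps seg => ps.flatMap (fun p => pvBases.map (fun b => p ++ b :: seg))) ps
        = ps.flatMap (fun p => (pvProd segs.length).map
            (fun insb => p ++ (List.zipWith (fun b seg => b :: seg) insb segs).flatten)) := by
  induction segs with
  | nil => intro ps; simp [pvProd]
  | cons seg segs ih =>
    intro ps
    simp only [List.foldl_cons, ih, pvProd, List.length_cons]
    simp [List.flatMap_assoc, List.flatMap_map, List.map_flatMap, List.map_map,
      Function.comp_def, List.append_assoc]

-- A's inner fold with the explicit counter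
theorem a_fold (insb : List Char) :
    ∀ (segs : List (List Char)) (k : Nat) (acc : List Char),
      k + segs.length ≤ insb.length →
      (segs.foldl (fun (st : Nat × List Char) seg =>
          (st.1 + 1, st.2 ++ [PySem.List.pyGetD insb (st.1 : Int) ' '] ++ seg)) (k, acc)).2
        = acc ++ (List.zipWith (fun b seg => b :: seg) ((insb.drop k).take segs.length) segs).flatten := by
  intro segs
  induction segs with
  | nil => intro k acc _; simp
  | cons seg segs ih =>
    intro k acc h
    simp only [List.foldl_cons]
    rw [ih (k + 1) _ (by simp only [List.length_cons] at h; omega)]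
    have hk : k < insb.length := by simp at h; omega
    have hget : PySem.List.pyGetD insb (k : Int) ' ' = insb[k] := by
      rw [PySem.List.pyGetD_natCast]; exact List.getD_eq_getElem _ _ hk
    have hdrop : insb.drop k = insb[k] :: insb.drop (k + 1) := List.drop_eq_getElem_cons hk
    rw [List.length_cons, hdrop, List.take_succ_cons, List.zipWith_cons_cons,
      List.flatten_cons, hget]
    simp [List.append_assoc]

-- ===== VERDICT (by name: the statement is the Claim_ definition above) =====
theorem insertion_seqs_py_spec : Claim_equal_insertion_seqs_py := by
  intro seq idxtup _
  unfold Spec_insertion_seqs_py insertion_seqs_py insertion_seqs_py_alt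
  match idxtup with
  | [] => rfl
  | i0 :: rest =>
    simp only []
    set s := seq.toList with hs
    set lastseg := PySem.List.slice s (some (PySem.List.pyGetD (i0 :: rest) (-1) 0)) none with hlast
    set pairs := (i0 :: rest).zip rest with hpairs
    set segsP : List (List Char) := pairs.map (fun ij => PySem.List.slice s (some ij.1) (some ij.2)) with hsegsP
    set pre := PySem.List.slice s none (some i0) with hpre
    have hlenP : segsP.length = rest.length := by
      simp [hsegsP, hpairs, List.length_zip]
    have hBfold : pairs.foldl
        (fun (ps : List (List Char)) (ij : Int × Int) =>
          ps.flatMap (fun p => pvBases.map (fun b => p ++ b :: PySem.List.slice s (some ij.1) (some ij.2))))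
        [pre]
        = segsP.foldl (fun ps seg => ps.flatMap (fun p => pvBases.map (fun b => p ++ b :: seg))) [pre] := by
      rw [hsegsP, List.foldl_map]
    simp only [List.length_cons]
    trans ((pvProd (rest.length + 1)).map (fun insb =>
      String.ofList (pre ++ (List.zipWith (fun b seg => b :: seg) insb (segsP ++ [lastseg])).flatten)))
    · -- A side: compare pointwise over the product list
      apply List.map_congr_left
      intro insb hins
      have hlins : insb.length = rest.length + 1 := by
        simpa using length_mem_pvProd hins
      have hAfold : pairs.foldl
          (fun (st : Nat × List Char) (ij : Int × Int) =>
            (st.1 + 1, st.2 ++ [PySem.List.pyGetD insb (st.1 : Int) ' '] ++ PySem.List.slice s (some ij.1) (some ij.2)))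
          (0, pre)
          = segsP.foldl (fun (st : Nat × List Char) seg =>
              (st.1 + 1, st.2 ++ [PySem.List.pyGetD insb (st.1 : Int) ' '] ++ seg)) (0, pre) := by
        rw [hsegsP, List.foldl_map]
      rw [hAfold, a_fold insb segsP 0 pre (by rw [hlenP, hlins]; omega)]
      have hne : insb ≠ [] := by intro h; rw [h] at hlins; simp at hlins
      have hgetlast : PySem.List.pyGetD insb (-1) ' ' = insb.getLast hne :=
        PySem.List.pyGetD_neg_one (xs := insb) (d := ' ') hne
      have hdropm : insb.drop rest.length = [insb.getLast hne] := by
        have h1 : insb.drop rest.length = [insb[rest.length]] := by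
          have := List.drop_eq_getElem_cons (l := insb) (i := rest.length) (by omega)
          rw [this, List.drop_eq_nil_of_le (by omega)]
        rw [h1, List.getLast_eq_getElem]
        congr 1
        simp [hlins]
      have hsplit : insb = insb.take rest.length ++ [insb.getLast hne] := by
        conv_lhs => rw [← List.take_append_drop rest.length insb]
        rw [hdropm]
      have hzip : List.zipWith (fun b seg => b :: seg) insb (segsP ++ [lastseg])
          = List.zipWith (fun b seg => b :: seg) (insb.take rest.length) segsP
            ++ [insb.getLast hne :: lastseg] := by
        conv_lhs => rw [hsplit]
        rw [List.zipWith_append (by simp [hlenP, hlins])]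
        simp
      congr 1
      simp [hgetlast, hzip, hlenP, List.flatten_append, List.append_assoc]
    · -- B side: one more fold step, then the worklist characterization
      symm
      rw [hBfold]
      have hstep : (segsP.foldl (fun ps seg => ps.flatMap (fun p => pvBases.map (fun b => p ++ b :: seg))) [pre]).flatMap
            (fun p => pvBases.map (fun b => String.ofList (p ++ b :: lastseg)))
          = (((segsP ++ [lastseg]).foldl (fun ps seg => ps.flatMap (fun p => pvBases.map (fun b => p ++ b :: seg))) [pre]).map String.ofList) := by
        rw [List.foldl_append]
        simp [List.map_flatMap, List.map_map, Function.comp_def]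
      rw [hstep, b_fold]
      simp [hlenP, List.map_map, Function.comp_def]
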